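-- pv_equiv track=rewrite | github.com/junyounglee-rgb/COS_Design | excel_diff/diff_core.py | _index_by_row
-- ===== SOURCE A (Python) =====
-- def _index_by_row(data: dict[tuple[int, int], str]) -> dict[int, dict[int, str]]:
--     """
--     Flat dict `{(row, col): value}` → `{row: {col: value}}` 로 1회 재인덱싱.
--     이후 행 단위 조회가 O(M) 스캔 대신 O(1) dict lookup 으로 가능.
--     """
--     by_row: dict[int, dict[int, str]] = {}
--     for (r, c), v in data.items():
--         sub = by_row.get(r)
--         if sub is None:
--             by_row[r] = {c: v}
--         else:
--             sub[c] = v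
--     return by_row
-- ===== SOURCE B (Python) =====
-- def _index_by_row(data: dict[tuple[int, int], str]) -> dict[int, dict[int, str]]:
--     """Two-pass rewrite: dedup the row keys in first-occurrence order, then build
--     each row's inner dict by scanning the items for that row."""
--     rows = list(dict.fromkeys(r for (r, _c) in data))
--     return {r: {c: v for (r2, c), v in data.items() if r2 == r} for r in rows}
-- ===== Notes on version B (the rewrite author's own statement) =====
-- stated objective: simpler
-- what changed: A builds the nested dict in one fold that hash-buckets each item into its row's sub-dict; B first dedups the row keys in first-occurrence order and then builds each row's inner dict by a separate scan over the items, as a dict comprehension.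
import Mathlib
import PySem

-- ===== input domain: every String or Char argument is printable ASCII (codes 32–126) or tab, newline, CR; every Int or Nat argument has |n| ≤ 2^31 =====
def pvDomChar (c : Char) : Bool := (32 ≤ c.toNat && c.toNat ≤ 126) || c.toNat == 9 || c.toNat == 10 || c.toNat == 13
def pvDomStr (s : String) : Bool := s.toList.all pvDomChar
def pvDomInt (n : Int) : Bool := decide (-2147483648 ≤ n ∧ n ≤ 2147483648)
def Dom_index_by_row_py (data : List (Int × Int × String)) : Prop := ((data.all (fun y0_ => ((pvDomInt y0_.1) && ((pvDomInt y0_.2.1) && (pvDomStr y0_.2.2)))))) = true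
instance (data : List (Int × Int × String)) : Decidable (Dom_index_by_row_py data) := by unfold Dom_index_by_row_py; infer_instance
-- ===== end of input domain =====

-- B replaces A's single-pass hash-bucketing fold with a two-pass decomposition (dedup the
-- row keys, then one scan per row); simpler to read, not faster.

-- ===== PORT A =====
-- A: one fold over the items, maintaining a dict of dicts (insert into the row's sub-dict,
-- creating it on first sight of the row).
def index_by_row_py (data : List (Int × Int × String)) : List (Int × List (Int × String)) :=
  ((data.foldl (fun by_row x =>
      match PySem.Dict.get? by_row x.1 with
      | none => PySem.Dict.insert by_row x.1 (PySem.Dict.insert PySem.Dict.empty x.2.1 x.2.2)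
      | some sub => PySem.Dict.insert by_row x.1 (PySem.Dict.insert sub x.2.1 x.2.2))
    (PySem.Dict.empty : PySem.Dict Int (PySem.Dict Int String))).items).map
    (fun p => (p.1, p.2.items))

-- ===== PORT B =====
-- inner dict comprehension of Source B: {c: v for (r2, c), v in data.items() if r2 == r}
def pvInnerRow (data : List (Int × Int × String)) (r : Int) : PySem.Dict Int String :=
  (data.filter (fun x => x.1 == r)).foldl
    (fun d x => PySem.Dict.insert d x.2.1 x.2.2) PySem.Dict.empty

def index_by_row_py_alt (data : List (Int × Int × String)) : List (Int × List (Int × String)) :=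
  (PySem.List.dedup (data.map (·.1))).map (fun r => (r, (pvInnerRow data r).items))

-- ===== PRECONDITION & SPEC =====
def Spec_index_by_row_py (data : List (Int × Int × String)) (out : List (Int × List (Int × String))) : Prop := out = index_by_row_py_alt data
instance (data : List (Int × Int × String)) (out : List (Int × List (Int × String))) : Decidable (Spec_index_by_row_py data out) := by unfold Spec_index_by_row_py; infer_instance

-- ===== CLAIM (what is proved, stated in full; the proofs are below) =====
def Claim_equal_index_by_row_py : Prop := ∀ (data : List (Int × Int × String)), Dom_index_by_row_py data → Spec_index_by_row_py data (index_by_row_py data)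

-- ===== LEMMAS AND PROOFS =====

lemma pvInnerRow_append (xs : List (Int × Int × String)) (r c : Int) (v : String) (r' : Int) :
    pvInnerRow (xs ++ [(r, c, v)]) r' =
      if r' = r then (pvInnerRow xs r').insert c v else pvInnerRow xs r' := by
  unfold pvInnerRow
  rw [List.filter_append, List.foldl_append]
  by_cases h : r' = r
  · simp [h]
  · have hb : (r == r') = false := beq_eq_false_iff_ne.mpr (Ne.symm h)
    simp [h, hb]

lemma pvInnerRow_of_not_mem (xs : List (Int × Int × String)) (r : Int)
    (h : r ∉ xs.map (·.1)) : pvInnerRow xs r = PySem.Dict.empty := by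
  unfold pvInnerRow
  have : xs.filter (fun x => x.1 == r) = [] := by
    rw [List.filter_eq_nil_iff]
    intro x hx
    simp only [beq_iff_eq]
    intro he
    exact h (List.mem_map.mpr ⟨x, hx, he⟩)
  rw [this]; rfl

-- the main invariant: A's fold, as a dict, has exactly B's items
lemma pv_main (data : List (Int × Int × String)) :
    (data.foldl (fun by_row x =>
      match PySem.Dict.get? by_row x.1 with
      | none => PySem.Dict.insert by_row x.1 (PySem.Dict.insert PySem.Dict.empty x.2.1 x.2.2)
      | some sub => PySem.Dict.insert by_row x.1 (PySem.Dict.insert sub x.2.1 x.2.2))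
    (PySem.Dict.empty : PySem.Dict Int (PySem.Dict Int String))).items
    = (PySem.List.dedup (data.map (·.1))).map (fun r => (r, pvInnerRow data r)) := by
  induction data using List.reverseRecOn with
  | nil => rfl
  | append_singleton xs e ih =>
    obtain ⟨r, c, v⟩ := e
    rw [List.foldl_append, List.foldl_cons, List.foldl_nil]
    generalize hG : (List.foldl (fun by_row x =>
        match PySem.Dict.get? by_row x.1 with
        | none => PySem.Dict.insert by_row x.1 (PySem.Dict.insert PySem.Dict.empty x.2.1 x.2.2)
        | some sub => PySem.Dict.insert by_row x.1 (PySem.Dict.insert sub x.2.1 x.2.2))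
        (PySem.Dict.empty : PySem.Dict Int (PySem.Dict Int String)) xs) = D at ih ⊢
    have hitems := ih
    have hkeys : D.keys = PySem.List.dedup (xs.map (·.1)) := by
      simp [PySem.Dict.keys, hitems, List.map_map, Function.comp_def]
    have hnd : D.keys.Nodup := by
      rw [hkeys]; exact PySem.List.nodup_dedup _
    simp only [List.map_append, List.map_cons, List.map_nil]
    by_cases hr : r ∈ List.map (fun x => x.1) xs
    · have hrd : r ∈ PySem.List.dedup (List.map (fun x => x.1) xs) := by
        simpa [PySem.List.mem_dedup] using hr
      have hget : D.get? r = some (pvInnerRow xs r) :=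
        PySem.Dict.get?_of_mem_items D (by rw [hitems]; exact List.mem_map.mpr ⟨r, hrd, rfl⟩) hnd
      have hcont : D.contains r = true := by
        rw [PySem.Dict.contains_eq_isSome_get? D, hget]; rfl
      have hded2 : PySem.List.dedup (List.map (fun x => x.1) xs ++ [r])
          = PySem.List.dedup (List.map (fun x => x.1) xs) := by
        simp [PySem.Set.ofList_append, PySem.Set.update_cons, PySem.Set.update_nil,
          PySem.Set.add]
        obtain ⟨x, hx, hx1⟩ := List.mem_map.mp hr
        exact ⟨x.2.1, x.2.2, by rw [← hx1]; simpa using hx⟩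
      simp only [hget]
      rw [PySem.Dict.items_insert_of_contains D _ hcont, hitems, List.map_map, hded2]
      apply List.map_congr_left
      intro r' hr'
      by_cases h2 : r' = r
      · subst h2; simp [pvInnerRow_append, Function.comp]
      · have hb : (r' == r) = false := beq_eq_false_iff_ne.mpr h2
        simp [pvInnerRow_append, h2, hb, Function.comp]
    · have hrd : r ∉ PySem.List.dedup (List.map (fun x => x.1) xs) := by
        simpa [PySem.List.mem_dedup] using hr
      have hget : D.get? r = none := by
        rw [PySem.Dict.get?_eq_none_iff_not_mem_keys D, hkeys]
        simpa [PySem.List.mem_dedup] using hr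
      have hcont : D.contains r = false := by
        rw [PySem.Dict.contains_eq_isSome_get? D, hget]; rfl
      have hded2 : PySem.List.dedup (List.map (fun x => x.1) xs ++ [r])
          = PySem.List.dedup (List.map (fun x => x.1) xs) ++ [r] := by
        simp [PySem.Set.ofList_append, PySem.Set.update_cons, PySem.Set.update_nil,
          PySem.Set.add]
        intro a b h
        exact hr (List.mem_map.mpr ⟨(r, a, b), h, rfl⟩)
      simp only [hget]
      rw [PySem.Dict.items_insert_of_not_contains D _ hcont, hitems, hded2, List.map_append]
      congr 1
      · apply List.map_congr_left
        intro r' hr'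
        have h2 : r' ≠ r := fun h => hrd (h ▸ hr')
        simp [pvInnerRow_append, h2]
      · simp [pvInnerRow_append, pvInnerRow_of_not_mem xs r hr]

-- ===== VERDICT (by name: the statement is the Claim_ definition above) =====
theorem index_by_row_py_spec : Claim_equal_index_by_row_py := by
  intro data _
  unfold Spec_index_by_row_py index_by_row_py index_by_row_py_alt
  rw [pv_main, List.map_map]
  rfl
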